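-- pv_equiv track=rewrite | github.com/mkos11/datastructuresAndAlgorithms | 분류가 필요한 아이들/01신규 아이디 추천.py | solution
-- ===== SOURCE A (Python) =====
-- alp = 'abcdefghijklmnopqrstuvwxyz-_.0123456789'
--
-- def end_dot_remove(new_id):
--     for i in range(len(new_id)-1, -1, -1):
--         if new_id[i] != '.':
--             return new_id[:i+1]
--     return ''
--
-- def solution(new_id):
--     new_id = new_id.lower()
--
--     temp = ''
--     for c in new_id:
--         if c not in alp: continue
--         temp += c
--
--     new_id = ''
--     prev = '.'
--     for c in temp:
--         if prev == '.' and c == '.': continue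
--         new_id += c
--         prev = c
--
--     new_id = end_dot_remove(new_id)
--
--     if new_id == '': new_id = 'a'
--
--     if len(new_id) >= 16: new_id = end_dot_remove(new_id[:15])
--
--     if len(new_id) <= 2: new_id += (new_id[-1] * (3 - len(new_id)))
--     return new_id
-- ===== SOURCE B (Python) =====
-- def solution(new_id):
--     allowed = 'abcdefghijklmnopqrstuvwxyz0123456789-_.'
--     out = []
--     for c in reversed(new_id.lower()):
--         if c in allowed and not (c == '.' and (not out or out[-1] == '.')):
--             out.append(c)
--     s = ''.join(reversed(out)).lstrip('.')
--     if not s: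
--         s = 'a'
--     s = s[:15].rstrip('.')
--     return s if len(s) >= 3 else s + s[-1] * (3 - len(s))
-- ===== Notes on version B (the rewrite author's own statement) =====
-- stated objective: alternative
-- what changed: Replaces A's three forward passes (filter loop, stateful prev-dot dedup loop, and an index-walking end_dot_remove helper called twice) by a single right-to-left scan over a list that filters, collapses dot runs and drops trailing dots in one pass, finished with lstrip/rstrip string methods.
import Mathlib
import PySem

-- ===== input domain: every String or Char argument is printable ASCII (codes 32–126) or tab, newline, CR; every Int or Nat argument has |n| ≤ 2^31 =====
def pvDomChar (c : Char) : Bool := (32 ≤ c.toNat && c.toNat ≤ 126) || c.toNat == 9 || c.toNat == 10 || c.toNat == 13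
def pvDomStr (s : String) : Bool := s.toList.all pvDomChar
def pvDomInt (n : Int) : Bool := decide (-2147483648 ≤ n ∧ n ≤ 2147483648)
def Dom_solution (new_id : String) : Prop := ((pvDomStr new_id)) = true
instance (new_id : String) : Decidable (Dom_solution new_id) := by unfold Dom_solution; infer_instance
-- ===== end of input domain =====

set_option maxRecDepth 8192

-- B replaces A's three forward passes (filter, prev-dot dedup, index-walking end_dot_remove
-- twice) by one right-to-left scan plus lstrip/rstrip; same cost, different structure.


-- ===== PORT A =====
def pvAlp : List Char := "abcdefghijklmnopqrstuvwxyz-_.0123456789".toList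

-- the 'for i in range(len-1, -1, -1)' loop of end_dot_remove, by downward recursion on i+1;
-- new_id[i] is always in range in the loop, ported as s[i]? (the none branch is unreachable)
def pvEdrGo (s : List Char) : Nat → List Char
  | 0 => []
  | i + 1 =>
    if s[i]? ≠ some '.' then PySem.List.slice s none (some ((i : Int) + 1))
    else pvEdrGo s i

def end_dot_remove (s : List Char) : List Char := pvEdrGo s s.length

def solution (new_id : String) : String :=
  let lowered := PySem.Chars.lower new_id.toList
  -- Python's 'c not in alp' for the single char c is char membership in alp (exact)
  let temp := lowered.foldl (fun acc c => if pvAlp.contains c = false then acc else acc ++ [c]) []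
  let st := temp.foldl (fun (st : List Char × Char) c =>
      if st.2 = '.' ∧ c = '.' then st else (st.1 ++ [c], c)) ([], '.')
  let s1 := end_dot_remove st.1
  let s2 := if s1 = [] then ['a'] else s1
  let s3 := if s2.length ≥ 16 then end_dot_remove (PySem.List.slice s2 none (some 15)) else s2
  let s4 := if s3.length ≤ 2 then
      match PySem.List.pyGet? s3 (-1) with    -- new_id[-1]; s3 is never empty here
      | some c => s3 ++ List.replicate (3 - s3.length) c   -- 3 - len ≥ 0 here, Nat sub exact
      | none => s3
    else s3
  String.ofList s4

-- ===== PORT B =====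
def pvAllowed : List Char := "abcdefghijklmnopqrstuvwxyz0123456789-_.".toList

-- s.rstrip('.')
def pvRstripDots (s : List Char) : List Char := (s.reverse.dropWhile (· == '.')).reverse

def solution_alt (new_id : String) : String :=
  -- the 'for c in reversed(...): out.append(c)' loop; consing onto `out` while folding over
  -- the reversed list builds Python's ''.join(reversed(out)) directly, out.head? = out[-1]
  let out := (PySem.Chars.lower new_id.toList).reverse.foldl
      (fun out c =>
        if pvAllowed.contains c ∧ ¬(c = '.' ∧ (out = [] ∨ out.head? = some '.'))
        then c :: out else out) []
  let s := out.dropWhile (· == '.')          -- .lstrip('.')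
  let s := if s = [] then ['a'] else s
  let s := pvRstripDots (s.take 15)          -- s[:15].rstrip('.')
  String.ofList (if s.length ≥ 3 then s
    else match PySem.List.pyGet? s (-1) with -- s[-1]; s is never empty here
      | some c => s ++ List.replicate (3 - s.length) c
      | none => s)

-- ===== PRECONDITION & SPEC =====
def Spec_solution (new_id : String) (out : String) : Prop := out = solution_alt new_id
instance (new_id : String) (out : String) : Decidable (Spec_solution new_id out) := by unfold Spec_solution; infer_instance

-- ===== CLAIM (what is proved, stated in full; the proofs are below) =====
def Claim_equal_solution : Prop := ∀ (new_id : String), Dom_solution new_id → Spec_solution new_id (solution new_id)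

-- ===== LEMMAS AND PROOFS =====

-- A's dot-collapsing pass as a direct recursion (b = "previous char was a dot")
def pvFd (b : Bool) : List Char → List Char
  | [] => []
  | c :: cs => if b = true ∧ c = '.' then pvFd b cs else c :: pvFd (c == '.') cs

-- B's right-to-left step and scan on the filtered list
def pvGstep (c : Char) (acc : List Char) : List Char :=
  if c = '.' ∧ (acc = [] ∨ acc.head? = some '.') then acc else c :: acc

def pvG (t : List Char) : List Char := t.foldr pvGstep []

theorem pv_contains_eq (c : Char) : pvAlp.contains c = pvAllowed.contains c := by
  have hp : pvAlp.Perm pvAllowed := by decide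
  simp only [List.contains_eq_mem, decide_eq_decide]
  exact hp.mem_iff

theorem pv_filter_foldl (l acc : List Char) :
    l.foldl (fun acc c => if pvAlp.contains c = false then acc else acc ++ [c]) acc
      = acc ++ l.filter (fun c => pvAllowed.contains c) := by
  induction l generalizing acc with
  | nil => simp
  | cons c cs ih =>
    rw [List.foldl_cons, List.filter_cons, ← pv_contains_eq c]
    cases h : pvAlp.contains c
    · rw [if_pos rfl, if_neg (by simp), ih]
    · rw [if_neg (by simp), if_pos rfl, ih, List.append_assoc]
      rfl

theorem pv_dedup_foldl (t : List Char) (acc : List Char) (p : Char) :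
    (t.foldl (fun (st : List Char × Char) c =>
      if st.2 = '.' ∧ c = '.' then st else (st.1 ++ [c], c)) (acc, p)).1
      = acc ++ pvFd (p == '.') t := by
  induction t generalizing acc p with
  | nil => simp [pvFd]
  | cons c cs ih =>
    by_cases hp : p = '.' <;> by_cases hc : c = '.' <;>
      simp [pvFd, hp, hc, ih, List.append_assoc]

theorem pv_bscan_filter (l : List Char) :
    l.foldr (fun c out =>
        if pvAllowed.contains c ∧ ¬(c = '.' ∧ (out = [] ∨ out.head? = some '.'))
        then c :: out else out) []
      = pvG (l.filter (fun c => pvAllowed.contains c)) := by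
  induction l with
  | nil => rfl
  | cons c cs ih =>
    rw [List.foldr_cons, ih, List.filter_cons]
    cases h : pvAllowed.contains c
    · rw [if_neg (by simp), if_neg (by simp)]
    · rw [if_pos rfl]
      show _ = pvGstep c (pvG (cs.filter (fun c => pvAllowed.contains c)))
      unfold pvGstep
      by_cases hd : c = '.' ∧ (pvG (cs.filter (fun c => pvAllowed.contains c)) = [] ∨
          (pvG (cs.filter (fun c => pvAllowed.contains c))).head? = some '.')
      · rw [if_neg (fun hx => hx.2 hd), if_pos hd]
      · rw [if_pos ⟨rfl, hd⟩, if_neg hd]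

theorem pv_rstrip_append_dot (xs : List Char) :
    pvRstripDots (xs ++ ['.']) = pvRstripDots xs := by
  simp only [pvRstripDots, List.reverse_append, List.reverse_cons, List.reverse_nil,
    List.nil_append, List.singleton_append, List.dropWhile_cons]
  rw [if_pos (show (('.' : Char) == '.') = true from rfl)]

theorem pv_rstrip_append_ne (xs : List Char) (c : Char) (h : c ≠ '.') :
    pvRstripDots (xs ++ [c]) = xs ++ [c] := by
  simp only [pvRstripDots, List.reverse_append, List.reverse_cons, List.reverse_nil,
    List.nil_append, List.singleton_append, List.dropWhile_cons]
  have hb : (c == '.') = false := by simp [h]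
  rw [hb, if_neg (by simp)]
  simp

-- end_dot_remove IS rstrip('.')
theorem pv_edrGo_eq (s : List Char) (i : Nat) (h : i ≤ s.length) :
    pvEdrGo s i = pvRstripDots (s.take i) := by
  induction i with
  | zero => simp [pvEdrGo, pvRstripDots]
  | succ j ih =>
    have hj : j < s.length := by omega
    have ht : s.take (j + 1) = s.take j ++ [s[j]] := by
      simp only [List.take_succ, List.getElem?_eq_getElem hj, Option.toList_some]
    rw [pvEdrGo]
    by_cases hc : s[j] = '.'
    · rw [if_neg (by simp [List.getElem?_eq_getElem hj, hc]), ih (by omega), ht, hc,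
        pv_rstrip_append_dot]
    · rw [if_pos (by simp [List.getElem?_eq_getElem hj, hc]), ht,
        pv_rstrip_append_ne _ _ hc, PySem.List.slice_to s (by omega)]
      have hn : ((j : Int) + 1).toNat = j + 1 := by omega
      rw [hn, ht]

theorem pv_edr_eq (s : List Char) : end_dot_remove s = pvRstripDots s := by
  rw [end_dot_remove, pv_edrGo_eq s s.length le_rfl, List.take_length]

theorem pv_rstrip_cons (c : Char) (x : List Char) :
    pvRstripDots (c :: x) =
      if pvRstripDots x = [] then (if c = '.' then [] else [c]) else c :: pvRstripDots x := by
  simp only [pvRstripDots, List.reverse_cons, List.dropWhile_append]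
  by_cases hx : (x.reverse.dropWhile (· == '.')).isEmpty
  · rw [if_pos hx]
    rw [List.isEmpty_iff] at hx
    rw [if_pos (by simp [hx])]
    by_cases hc : c = '.'
    · rw [if_pos hc]
      simp [List.dropWhile_cons, hc]
    · rw [if_neg hc]
      simp [List.dropWhile_cons, hc]
  · have hx' : x.reverse.dropWhile (· == '.') ≠ [] := by
      simpa [List.isEmpty_iff] using hx
    rw [if_neg hx, if_neg (by simp [hx'])]
    simp

-- shape invariant of the right-to-left scan: a leading dot is single and not the whole value
def pvGood (l : List Char) : Prop := ∀ xs, l = '.' :: xs → xs ≠ [] ∧ xs.head? ≠ some '.' 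

theorem pv_g_good (t : List Char) : pvGood (pvG t) := by
  induction t with
  | nil => intro xs h; simp [pvG] at h
  | cons c cs ih =>
    show pvGood (pvGstep c (pvG cs))
    unfold pvGstep
    by_cases h : c = '.' ∧ (pvG cs = [] ∨ (pvG cs).head? = some '.')
    · rw [if_pos h]; exact ih
    · rw [if_neg h]
      intro xs heq
      injection heq with h1 h2
      subst h1
      subst h2
      push_neg at h
      exact h rfl

theorem pv_dot_beq : (('.' : Char) == '.') = true := rfl

-- helper: a list whose head is not a dot is unchanged by dropWhile dots
theorem pv_dropWhile_of_head_ne (l : List Char) (h : l.head? ≠ some '.') :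
    l.dropWhile (· == '.') = l := by
  cases l with
  | nil => rfl
  | cons y ys =>
    have : y ≠ '.' := by simpa using h
    simp [List.dropWhile_cons, this]

-- the core: A's dedup+rstrip equals B's scan (+lstrip), on any filtered list
theorem pv_core (t : List Char) :
    pvRstripDots (pvFd false t) = pvG t ∧
    pvRstripDots (pvFd true t) = (pvG t).dropWhile (· == '.') := by
  induction t with
  | nil => exact ⟨by simp [pvFd, pvRstripDots, pvG], by simp [pvFd, pvRstripDots, pvG]⟩
  | cons c cs ih =>
    obtain ⟨ih1, ih2⟩ := ih
    have hgood := pv_g_good cs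
    have hstep : pvG (c :: cs) = pvGstep c (pvG cs) := rfl
    by_cases hc : c = '.'
    · subst hc
      have hfd_t : pvFd true ('.' :: cs) = pvFd true cs := by simp [pvFd]
      have hfd_f : pvFd false ('.' :: cs) = '.' :: pvFd true cs := by simp [pvFd]
      by_cases h0 : pvG cs = [] ∨ (pvG cs).head? = some '.'
      · have hg : pvG ('.' :: cs) = pvG cs := by
          rw [hstep]; unfold pvGstep; rw [if_pos ⟨rfl, h0⟩]
        constructor
        · rw [hfd_f, pv_rstrip_cons, ih2, hg]
          rcases h0 with h0 | h0
          · simp [h0]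
          · -- pvG cs = '.' :: xs with xs ≠ [] and xs.head? ≠ '.'
            cases hcs : pvG cs with
            | nil => rw [hcs] at h0; simp at h0
            | cons y ys =>
              rw [hcs] at h0 hgood
              have hy : y = '.' := by simpa using h0
              subst hy
              obtain ⟨hx1, hx2⟩ := hgood ys rfl
              have hxs : ys.dropWhile (· == '.') = ys := pv_dropWhile_of_head_ne ys hx2
              rw [List.dropWhile_cons, pv_dot_beq, if_pos rfl, hxs, if_neg hx1]
        · rw [hfd_t, ih2, hg]
      · have h1 : pvG cs ≠ [] := (not_or.mp h0).1
        have h2 : (pvG cs).head? ≠ some '.' := (not_or.mp h0).2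
        have hg : pvG ('.' :: cs) = '.' :: pvG cs := by
          rw [hstep]; unfold pvGstep; rw [if_neg (by rintro ⟨-, h⟩; exact h0 h)]
        have hl : (pvG cs).dropWhile (· == '.') = pvG cs := pv_dropWhile_of_head_ne _ h2
        constructor
        · rw [hfd_f, pv_rstrip_cons, ih2, hl, if_neg h1, hg]
        · rw [hfd_t, ih2, hl, hg, List.dropWhile_cons, pv_dot_beq, if_pos rfl, hl]
    · have hb : (c == '.') = false := by simp [hc]
      have hfd_t : pvFd true (c :: cs) = c :: pvFd false cs := by simp [pvFd, hc, hb]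
      have hfd_f : pvFd false (c :: cs) = c :: pvFd false cs := by simp [pvFd, hc, hb]
      have hg : pvG (c :: cs) = c :: pvG cs := by
        rw [hstep]; unfold pvGstep; rw [if_neg (by rintro ⟨h, -⟩; exact hc h)]
      have key : pvRstripDots (c :: pvFd false cs) = c :: pvG cs := by
        rw [pv_rstrip_cons, ih1]
        by_cases h0 : pvG cs = []
        · rw [if_pos h0, if_neg hc, h0]
        · rw [if_neg h0]
      constructor
      · rw [hfd_f, key, hg]
      · rw [hfd_t, key, hg, List.dropWhile_cons, if_neg (by simp [hc])]

theorem pv_rstrip_no_trailing (s : List Char) :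
    pvRstripDots (pvRstripDots s) = pvRstripDots s := by
  simp [pvRstripDots, List.dropWhile_idempotent]

-- glue: the filtered list is the same on both sides, and the tail steps line up
theorem pv_solution_eq (new_id : String) : solution new_id = solution_alt new_id := by
  unfold solution solution_alt
  simp only [List.foldl_reverse]
  rw [pv_bscan_filter, pv_filter_foldl, pv_dedup_foldl, pv_edr_eq]
  simp only [List.nil_append]
  set t := (PySem.Chars.lower new_id.toList).filter (fun c => pvAllowed.contains c) with ht
  have hcore := (pv_core t).2
  rw [show (('.' : Char) == '.') = true from rfl] at *
  rw [hcore]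
  set b1 := (pvG t).dropWhile (· == '.') with hb1
  set s2 := if b1 = [] then ['a'] else b1 with hs2
  -- s2 has no trailing dot: it is 'a' or an rstripped value
  have hs2r : pvRstripDots s2 = s2 := by
    rw [hs2]
    by_cases h0 : b1 = []
    · simp [h0, pvRstripDots, List.dropWhile]
    · rw [if_neg h0]
      have hdb : b1 = pvRstripDots (pvFd true t) := hcore.symm
      rw [hdb, pv_rstrip_no_trailing]
  have htrunc : (if s2.length ≥ 16 then end_dot_remove (PySem.List.slice s2 none (some 15)) else s2)
      = pvRstripDots (s2.take 15) := by
    by_cases h16 : s2.length ≥ 16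
    · rw [if_pos h16, pv_edr_eq, PySem.List.slice_to s2 (by norm_num)]
      have h15 : (15 : Int).toNat = 15 := rfl
      rw [h15]
    · rw [if_neg h16, List.take_of_length_le (by omega), hs2r]
  rw [htrunc]
  set s3 := pvRstripDots (s2.take 15) with hs3
  by_cases h3 : s3.length ≥ 3
  · rw [if_pos h3, if_neg (by omega)]
  · rw [if_neg h3, if_pos (by omega)]

-- ===== VERDICT (by name: the statement is the Claim_ definition above) =====
theorem solution_spec : Claim_equal_solution := by
  intro new_id _
  show solution new_id = solution_alt new_id
  exact pv_solution_eq new_id
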